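-- pv_equiv track=rewrite | github.com/Delivery-Klad/Schedule_Bot_Vk | methods/funcs.py | sort_days
-- ===== SOURCE A (Python) =====
-- def sort_days(days):
--     temp, day = [], ["monday", "tuesday", "wednesday", "thursday", "friday", "saturday", "sunday"]
--     for i in days:
--         temp.append(day.index(i))
--     temp.sort()
--     days, index = [], 10
--     for i in temp:
--         days.append(day[i])
--     return days
-- ===== SOURCE B (Python) =====
-- WEEK = ["monday", "tuesday", "wednesday", "thursday", "friday", "saturday", "sunday"]
--
--
-- def sort_days(days):
--     # counting sort over the fixed canonical week: validate, then emit each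
--     # weekday as many times as it occurs (no comparison sort, no index math)
--     for d in days:
--         if d not in WEEK:
--             raise ValueError(f"{d!r} is not in list")
--     return [d for d in WEEK for _ in range(days.count(d))]
-- ===== Notes on version B (the rewrite author's own statement) =====
-- stated objective: alternative
-- what changed: replaces index-mapping + comparison sort + index-lookup with a counting sort over the fixed 7-day canonical list (validate membership, then replicate each weekday by its count)
import Mathlib
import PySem

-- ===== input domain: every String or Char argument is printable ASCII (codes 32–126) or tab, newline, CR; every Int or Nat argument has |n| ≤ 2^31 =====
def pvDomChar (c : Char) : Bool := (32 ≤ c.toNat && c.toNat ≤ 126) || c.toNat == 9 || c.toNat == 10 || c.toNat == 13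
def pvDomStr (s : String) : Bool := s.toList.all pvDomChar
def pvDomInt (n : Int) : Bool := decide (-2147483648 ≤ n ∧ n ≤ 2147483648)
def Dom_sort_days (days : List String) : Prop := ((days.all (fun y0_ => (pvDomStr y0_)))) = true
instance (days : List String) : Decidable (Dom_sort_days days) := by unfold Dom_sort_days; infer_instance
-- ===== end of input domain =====

-- B replaces A's index-map + comparison sort + index-lookup with a counting sort
-- over the fixed canonical weekday list; return-value equivalence proved on Pre_.

def pvWeek : List String :=
  ["monday", "tuesday", "wednesday", "thursday", "friday", "saturday", "sunday"]

-- ===== PORT A =====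
def sort_days (days : List String) : List String :=
  let temp : List Int :=
    days.foldl (fun acc i => acc ++ [(((PySem.List.index? pvWeek i).getD 0 : Nat) : Int)]) []
  let temp := PySem.List.sorted temp (fun x => x) false
  temp.foldl (fun acc i => acc ++ [(PySem.List.pyGet? pvWeek i).getD ""]) []

-- ===== PORT B =====
-- the validation loop ('raise ValueError' on a name outside pvWeek) returns no
-- value; those inputs are exactly the ones Pre_ excludes, so the port carries
-- only the returning path
def sort_days_alt (days : List String) : List String :=
  pvWeek.flatMap (fun d => List.replicate (PySem.List.count days d) d)

-- ===== PRECONDITION & SPEC =====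
-- Pre_ excludes exactly the inputs on which both A and B raise ValueError (a name not in the week list).
def Pre_sort_days (days : List String) : Prop := ∀ d ∈ days, d ∈ pvWeek
instance (days : List String) : Decidable (Pre_sort_days days) := by unfold Pre_sort_days; infer_instance
def pvWitness_sort_days : List String := ["friday", "monday", "friday"]

def Spec_sort_days (days : List String) (out : List String) : Prop := out = sort_days_alt days
instance (days : List String) (out : List String) : Decidable (Spec_sort_days days out) := by unfold Spec_sort_days; infer_instance

-- ===== CLAIM (what is proved, stated in full; the proofs are below) =====
def Claim_equal_sort_days : Prop :=
  ∀ (days : List String), Dom_sort_days days → Pre_sort_days days → Spec_sort_days days (sort_days days)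

-- ===== LEMMAS AND PROOFS =====

def pvIdx (d : String) : Int := (((PySem.List.index? pvWeek d).getD 0 : Nat) : Int)
def pvName (i : Int) : String := (PySem.List.pyGet? pvWeek i).getD ""

lemma pairwise_flatMap_replicate (ks : List Int) (n : Int → Nat)
    (h : ks.Pairwise (· ≤ ·)) :
    (ks.flatMap fun k => List.replicate (n k) k).Pairwise (fun a b => a ≤ b) := by
  induction ks with
  | nil => simp
  | cons k ks ih =>
    simp only [List.flatMap_cons, List.pairwise_append]
    rcases List.pairwise_cons.mp h with ⟨hk, htl⟩
    refine ⟨List.pairwise_replicate.mpr (Or.inr le_rfl), ih htl, ?_⟩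
    intro a ha b hb
    rcases List.eq_of_mem_replicate ha with rfl
    rcases List.mem_flatMap.mp hb with ⟨k', hk', hb'⟩
    rcases List.eq_of_mem_replicate hb' with rfl
    exact hk _ hk'

lemma count_flatMap_replicate (ks : List Int) (xs : List Int) (a : Int)
    (hnd : ks.Nodup) :
    (ks.flatMap fun k => List.replicate (xs.count k) k).count a
      = if a ∈ ks then xs.count a else 0 := by
  induction ks with
  | nil => simp
  | cons k ks ih =>
    rcases List.nodup_cons.mp hnd with ⟨hk, hnd'⟩
    simp only [List.flatMap_cons, List.count_append, List.count_replicate, ih hnd',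
      List.mem_cons]
    by_cases hak : a = k
    · subst hak
      simp [hk]
    · simp [hak, Ne.symm hak]

lemma inj_idx : ∀ x ∈ pvWeek, ∀ d ∈ pvWeek, pvIdx x = pvIdx d → x = d := by decide

lemma count_map_idx (days : List String) (hpre : Pre_sort_days days)
    (d : String) (hd : d ∈ pvWeek) :
    (days.map pvIdx).count (pvIdx d) = days.count d := by
  simp only [List.count, List.countP_map]
  refine List.countP_congr ?_
  intro x hx
  simp only [Function.comp_apply, beq_iff_eq]
  constructor
  · intro h; exact inj_idx x (hpre x hx) d hd h
  · intro h; rw [h]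

-- the sorted index list, named as an explicit counting-sort arrangement
lemma sorted_eq_counts (days : List String) (hpre : Pre_sort_days days) :
    PySem.List.sorted (days.map pvIdx) (fun x => x) false
      = (pvWeek.map pvIdx).flatMap (fun k => List.replicate ((days.map pvIdx).count k) k) := by
  have hnd : (pvWeek.map pvIdx).Nodup := by decide
  have hpw : (pvWeek.map pvIdx).Pairwise (· ≤ ·) := by decide
  refine PySem.List.sorted_id_eq_of_perm_of_pairwise _ _ ?_ ?_
  · refine List.perm_iff_count.mpr ?_
    intro a
    rw [count_flatMap_replicate _ _ _ hnd]
    by_cases ha : a ∈ pvWeek.map pvIdx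
    · simp [ha]
    · simp only [ha, if_false]
      symm
      refine List.count_eq_zero.mpr ?_
      intro hmem
      rcases List.mem_map.mp hmem with ⟨x, hx, rfl⟩
      exact ha (List.mem_map.mpr ⟨x, hpre x hx, rfl⟩)
  · exact pairwise_flatMap_replicate _ _ hpw

-- ===== VERDICT (by name: the statement is the Claim_ definition above) =====
theorem sort_days_spec : Claim_equal_sort_days := by
  intro days _ hpre
  unfold Spec_sort_days sort_days sort_days_alt
  simp only [PySem.List.foldl_append_singleton_eq_map, List.nil_append]
  rw [show (fun i => (((PySem.List.index? pvWeek i).getD 0 : Nat) : Int)) = pvIdx from rfl,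
      show (fun i => (PySem.List.pyGet? pvWeek i).getD "") = pvName from rfl,
      sorted_eq_counts days hpre, List.map_flatMap, List.flatMap_map]
  refine List.flatMap_congr ?_
  intro d hd
  rw [List.map_replicate, count_map_idx days hpre d hd]
  congr 1
  revert hd
  revert d
  decide
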